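-- pv_equiv track=rewrite | github.com/gouldberg/robotics-path-planning | src_path_planning/10_path_planning_01_rrt_07_informed_rrt_star.py | i4_bit_hi1
-- ===== SOURCE A (Python) =====
-- def i4_bit_hi1(n):
--     """
--      I4_BIT_HI1 returns the position of the high 1 bit base 2 in an I4.
--
--       Discussion:
--
--         An I4 is an integer ( kind = 4 ) value.
--
--       Example:
--
--            N    Binary    Hi 1
--         ----    --------  ----
--            0           0     0
--            1           1     1
--            2          10     2
--            3          11     2
--            4         100     3
--            5         101     3
--            6         110     3
--            7         111     3
--            8        1000     4
--            9        1001     4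
--           10        1010     4
--           11        1011     4
--           12        1100     4
--           13        1101     4
--           14        1110     4
--           15        1111     4
--           16       10000     5
--           17       10001     5
--         1023  1111111111    10
--         1024 10000000000    11
--         1025 10000000001    11
--
--       Licensing:
--
--         This code is distributed under the GNU LGPL license.
--
--       Modified:
--
--         26 October 2014
--
--       Author:
--
--         John Burkardt
--
--       Parameters:
--
--         Input, integer N, the integer to be measured.
--         N should be nonnegative.  If N is nonpositive, the function
--         will always be 0.
--
--         Output, integer BIT, the position of the highest bit.
--
--     """
--     i = n
--     bit = 0
--
--     while True:
--
--         if i <= 0: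
--             break
--
--         bit = bit + 1
--         i = i // 2
--
--     return bit
-- ===== SOURCE B (Python) =====
-- def i4_bit_hi1(n):
--     return n.bit_length() if n > 0 else 0
-- ===== Notes on version B (the rewrite author's own statement) =====
-- stated objective: simpler
-- what changed: Replaces the divide-by-two counting loop with a single closed-form call to int.bit_length (0 for nonpositive n), removing the loop and the accumulator entirely.
import Mathlib
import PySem

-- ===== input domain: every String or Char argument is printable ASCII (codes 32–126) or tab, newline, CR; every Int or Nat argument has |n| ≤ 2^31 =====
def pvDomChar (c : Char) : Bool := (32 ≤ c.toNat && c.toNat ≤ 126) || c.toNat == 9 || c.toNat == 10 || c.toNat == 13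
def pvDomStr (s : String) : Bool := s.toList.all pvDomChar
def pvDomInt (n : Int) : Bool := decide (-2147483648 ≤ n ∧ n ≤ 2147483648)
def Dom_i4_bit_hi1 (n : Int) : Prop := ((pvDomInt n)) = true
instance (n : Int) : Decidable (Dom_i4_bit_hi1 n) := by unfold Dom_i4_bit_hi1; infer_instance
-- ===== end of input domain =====

-- B replaces A's divide-by-two counting loop with the closed form bit_length (0 for n ≤ 0): simpler, no loop.

-- ===== PORT A =====
-- the while-loop: halve i until i ≤ 0, counting iterations in bit
def i4_bit_hi1_loop (i : Int) (bit : Int) : Int :=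
  if h : i ≤ 0 then bit
  else i4_bit_hi1_loop (PySem.Int.floordiv i 2) (bit + 1)
termination_by i.toNat
decreasing_by
  have h2 : PySem.Int.floordiv i 2 = i / 2 := PySem.Int.floordiv_eq_ediv_of_pos (by omega)
  rw [h2]; omega

def i4_bit_hi1 (n : Int) : Int := i4_bit_hi1_loop n 0

-- ===== PORT B =====
def i4_bit_hi1_alt (n : Int) : Int :=
  if 0 < n then (PySem.Int.bitLength n : Int) else 0

-- ===== PRECONDITION & SPEC =====
def Spec_i4_bit_hi1 (n : Int) (out : Int) : Prop := out = i4_bit_hi1_alt n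
instance (n : Int) (out : Int) : Decidable (Spec_i4_bit_hi1 n out) := by unfold Spec_i4_bit_hi1; infer_instance

-- ===== CLAIM (what is proved, stated in full; the proofs are below) =====
def Claim_equal_i4_bit_hi1 : Prop := ∀ (n : Int), Dom_i4_bit_hi1 n → Spec_i4_bit_hi1 n (i4_bit_hi1 n)

-- ===== LEMMAS AND PROOFS =====
theorem i4_bit_hi1_loop_eq (i bit : Int) :
    i4_bit_hi1_loop i bit = bit + (if 0 < i then (PySem.Int.bitLength i : Int) else 0) := by
  by_cases h : i ≤ 0
  · rw [i4_bit_hi1_loop]; simp [h]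
  · rw [i4_bit_hi1_loop]
    have h2 : PySem.Int.floordiv i 2 = i / 2 := PySem.Int.floordiv_eq_ediv_of_pos (by omega)
    have ih := i4_bit_hi1_loop_eq (PySem.Int.floordiv i 2) (bit + 1)
    rw [dif_neg h, ih]
    have hbl : PySem.Int.bitLength i = PySem.Int.bitLength (PySem.Int.floordiv i 2) + 1 :=
      PySem.Int.bitLength_of_pos (by omega)
    by_cases h3 : 0 < PySem.Int.floordiv i 2
    · simp [h3, hbl]; push_cast; omega
    · have : PySem.Int.bitLength (PySem.Int.floordiv i 2) = 0 := by
        rw [h2] at h3 ⊢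
        have : i / 2 = 0 := by omega
        rw [this]; exact PySem.Int.bitLength_zero
      simp only [if_neg h3, hbl, this]; push_cast; omega
termination_by i.toNat
decreasing_by
  have h2 : PySem.Int.floordiv i 2 = i / 2 := PySem.Int.floordiv_eq_ediv_of_pos (by omega)
  rw [h2]; omega

-- ===== VERDICT (by name: the statement is the Claim_ definition above) =====
theorem i4_bit_hi1_spec : Claim_equal_i4_bit_hi1 := by
  intro n _
  unfold Spec_i4_bit_hi1 i4_bit_hi1 i4_bit_hi1_alt
  rw [i4_bit_hi1_loop_eq]; omega
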